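-- pv_equiv track=rewrite | github.com/timerke/Yandex_contest | Rome_to_decimal_and_back/Rome_to_decimal_and_back.py | decimal_to_rome
-- ===== SOURCE A (Python) =====
-- decimal_base = {1: {1: 'I', 5: 'V'}, 10: {1: 'X', 5: 'L'}, 100: {1: 'C', 5: 'D'}, 1000: {1: 'M'}}
--
-- def decimal_to_rome(decimal):
--     # Для правильной записи больших чисел римскими цифрами необходимо
--     # сначала записать число тысяч, затем сотен, затем десятков и единиц
--     base = (1000, 100, 10, 1)
--     rome = ''
--     for i, n in enumerate(base):
--         nums = decimal // n # число тысяч, сотен, десятков или единиц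
--         decimal %= n
--         if n == 1000:
--             while nums:
--                 nums -= 1
--                 rome += decimal_base[n][1]
--         else:
--             while nums:
--                 if nums == 9:
--                     rome += decimal_base[n][1] + decimal_base[base[i - 1]][1]
--                     nums = 0
--                 elif nums == 4:
--                     rome += decimal_base[n][1] + decimal_base[n][5]
--                     nums = 0
--                 elif nums >= 5:
--                     rome += decimal_base[n][5]
--                     nums -= 5
--                 elif nums >= 1:
--                     rome += decimal_base[n][1]
--                     nums -= 1
--     return rome
-- ===== SOURCE B (Python) =====
-- def decimal_to_rome(decimal):
--     table = [(1000, 'M'), (900, 'CM'), (500, 'D'), (400, 'CD'),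
--              (100, 'C'), (90, 'XC'), (50, 'L'), (40, 'XL'),
--              (10, 'X'), (9, 'IX'), (5, 'V'), (4, 'IV'), (1, 'I')]
--     rome = ''
--     for value, symbol in table:
--         while decimal >= value:
--             rome += symbol
--             decimal -= value
--     return rome
-- ===== Notes on version B (the rewrite author's own statement) =====
-- stated objective: simpler
-- what changed: Replaced A's per-place division/modulo loop with explicit 4/5/9 digit arithmetic by a single greedy scan over the 13-entry subtractive table (value, symbol), subtracting while the value fits.
import Mathlib
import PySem

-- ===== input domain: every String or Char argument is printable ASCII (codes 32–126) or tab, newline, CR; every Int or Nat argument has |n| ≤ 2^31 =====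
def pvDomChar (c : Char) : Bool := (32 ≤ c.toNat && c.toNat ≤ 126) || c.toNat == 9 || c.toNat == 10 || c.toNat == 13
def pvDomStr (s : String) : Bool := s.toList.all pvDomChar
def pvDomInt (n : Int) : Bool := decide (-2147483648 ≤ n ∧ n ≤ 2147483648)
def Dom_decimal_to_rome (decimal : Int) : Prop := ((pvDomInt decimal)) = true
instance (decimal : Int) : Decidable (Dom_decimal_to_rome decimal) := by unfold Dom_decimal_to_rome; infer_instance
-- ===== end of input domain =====

-- B replaces A's per-place digit arithmetic (explicit 4/5/9 cases driven by // and %) with the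
-- classic greedy subtractive table of 13 (value, symbol) pairs; objective: simpler.
-- A's while-loops never terminate on negative input, hence Pre_ (0 ≤ decimal).

-- ===== PORT A =====
-- decimal_base = {1: {1:'I',5:'V'}, 10: {1:'X',5:'L'}, 100: {1:'C',5:'D'}, 1000: {1:'M'}}
def pvDecimalBase : PySem.Dict Int (PySem.Dict Int String) :=
  PySem.Dict.ofList
    [(1, PySem.Dict.ofList [(1, "I"), (5, "V")]),
     (10, PySem.Dict.ofList [(1, "X"), (5, "L")]),
     (100, PySem.Dict.ofList [(1, "C"), (5, "D")]),
     (1000, PySem.Dict.ofList [(1, "M")])]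

-- decimal_base[n][k]; the defaults are never reached on A's lookups (all keys are literal)
def pvDB (n k : Int) : String := (pvDecimalBase.getD n (PySem.Dict.ofList [])).getD k ""

-- `while nums: nums -= 1; rome += decimal_base[n][1]` (the n == 1000 branch).
-- Fuel nums.toNat makes the port total and is exact wherever Python terminates
-- (each iteration lowers nums by 1; for nums < 0 Python diverges).
def pvLoopMGo : Nat → String → String
  | 0, rome => rome
  | f + 1, rome => pvLoopMGo f (rome ++ pvDB 1000 1)
def pvLoopM (nums : Int) (rome : String) : String := pvLoopMGo nums.toNat rome

-- the `while nums:` body for n ≠ 1000 (pn = base[i-1]); fuel nums.toNat is exact for the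
-- same reason (every iteration lowers nums by at least 1, or exits; nums < 0 diverges in Python)
def pvLoopDigitGo : Nat → Int → Int → Int → String → String
  | 0, _, _, _, rome => rome
  | f + 1, n, pn, nums, rome =>
    if 0 < nums then
      if nums = 9 then rome ++ pvDB n 1 ++ pvDB pn 1
      else if nums = 4 then rome ++ pvDB n 1 ++ pvDB n 5
      else if 5 ≤ nums then pvLoopDigitGo f n pn (nums - 5) (rome ++ pvDB n 5)
      else pvLoopDigitGo f n pn (nums - 1) (rome ++ pvDB n 1)
    else rome
def pvLoopDigit (n pn nums : Int) (rome : String) : String := pvLoopDigitGo nums.toNat n pn nums rome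

def pvBaseA : List Int := [1000, 100, 10, 1]

-- one iteration of `for i, n in enumerate(base)`
def pvStepA (st : String × Int) (p : Int × Int) : String × Int :=
  let nums := PySem.Int.floordiv st.2 p.2
  let dec := PySem.Int.mod st.2 p.2
  if p.2 = 1000 then (pvLoopM nums st.1, dec)
  else (pvLoopDigit p.2 (PySem.List.pyGetD pvBaseA (p.1 - 1) 0) nums st.1, dec)

def decimal_to_rome (decimal : Int) : String :=
  ((PySem.List.enumerate pvBaseA).foldl pvStepA ("", decimal)).1

-- ===== PORT B =====
-- `while decimal >= value: rome += symbol; decimal -= value`, returning (decimal, rome).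
-- Fuel dec.toNat is exact: every table value is ≥ 1, so each iteration lowers dec by ≥ 1.
def pvGreedyGo : Nat → Int → String → Int → String → Int × String
  | 0, _, _, dec, rome => (dec, rome)
  | f + 1, v, sym, dec, rome =>
    if 0 < v ∧ v ≤ dec then pvGreedyGo f v sym (dec - v) (rome ++ sym) else (dec, rome)
def pvGreedy (value : Int) (symbol : String) (dec : Int) (rome : String) : Int × String :=
  pvGreedyGo dec.toNat value symbol dec rome

def pvTableB : List (Int × String) :=
  [(1000, "M"), (900, "CM"), (500, "D"), (400, "CD"),
   (100, "C"), (90, "XC"), (50, "L"), (40, "XL"),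
   (10, "X"), (9, "IX"), (5, "V"), (4, "IV"), (1, "I")]

def decimal_to_rome_alt (decimal : Int) : String :=
  (pvTableB.foldl (fun st p => pvGreedy p.1 p.2 st.1 st.2) (decimal, "")).2

-- ===== PRECONDITION & SPEC =====
-- A's while-loops never terminate when decimal < 0 (the digit counts go negative), so A
-- returns exactly on 0 ≤ decimal.
def Pre_decimal_to_rome (decimal : Int) : Prop := 0 ≤ decimal
instance (decimal : Int) : Decidable (Pre_decimal_to_rome decimal) := by unfold Pre_decimal_to_rome; infer_instance
def pvWitness_decimal_to_rome : Int := (1994)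

def Spec_decimal_to_rome (decimal : Int) (out : String) : Prop := out = decimal_to_rome_alt decimal
instance (decimal : Int) (out : String) : Decidable (Spec_decimal_to_rome decimal out) := by unfold Spec_decimal_to_rome; infer_instance

-- ===== CLAIM (what is proved, stated in full; the proofs are below) =====
def Claim_equal_decimal_to_rome : Prop := ∀ (decimal : Int), Dom_decimal_to_rome decimal → Pre_decimal_to_rome decimal → Spec_decimal_to_rome decimal (decimal_to_rome decimal)

-- ===== LEMMAS AND PROOFS =====

-- "M" repeated q times
def pvMRep : Nat → String
  | 0 => ""
  | q + 1 => "M" ++ pvMRep q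

theorem pvLoopMGo_spec (q : Nat) (rome : String) : pvLoopMGo q rome = rome ++ pvMRep q := by
  induction q generalizing rome with
  | zero => simp [pvLoopMGo, pvMRep]
  | succ k ih =>
      show pvLoopMGo k (rome ++ pvDB 1000 1) = rome ++ pvMRep (k + 1)
      rw [ih, pvMRep, ← String.append_assoc]
      rfl

theorem pvLoopDigitGo_append (f : Nat) (n pn nums : Int) (r s : String) :
    pvLoopDigitGo f n pn nums (r ++ s) = r ++ pvLoopDigitGo f n pn nums s := by
  induction f generalizing nums s with
  | zero => rfl
  | succ k ih =>
      show pvLoopDigitGo (k+1) n pn nums (r ++ s) = r ++ pvLoopDigitGo (k+1) n pn nums s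
      rw [pvLoopDigitGo, pvLoopDigitGo]
      split_ifs <;> simp [String.append_assoc, ih]

theorem pvGreedyGo_append (f : Nat) (v : Int) (sym : String) (dec : Int) (r s : String) :
    pvGreedyGo f v sym dec (r ++ s)
      = ((pvGreedyGo f v sym dec s).1, r ++ (pvGreedyGo f v sym dec s).2) := by
  induction f generalizing dec s with
  | zero => rfl
  | succ k ih =>
      rw [pvGreedyGo, pvGreedyGo]
      split_ifs with h
      · rw [String.append_assoc, ih]
      · rfl

theorem pvGreedy_append (v : Int) (sym : String) (dec : Int) (r s : String) :
    pvGreedy v sym dec (r ++ s) = ((pvGreedy v sym dec s).1, r ++ (pvGreedy v sym dec s).2) := by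
  unfold pvGreedy; exact pvGreedyGo_append _ _ _ _ _ _

theorem pvGreedyGo_fuel2 (f : Nat) : ∀ (f' : Nat) (v : Int) (sym : String) (dec : Int) (rome : String),
    0 < v → dec.toNat ≤ f → dec.toNat ≤ f' →
    pvGreedyGo f v sym dec rome = pvGreedyGo f' v sym dec rome := by
  induction f with
  | zero =>
      intro f' v sym dec rome hv hf hf'
      cases f' with
      | zero => rfl
      | succ m => rw [pvGreedyGo, pvGreedyGo, if_neg (by push Not; intro; omega)]
  | succ k ih =>
      intro f' v sym dec rome hv hf hf'
      cases f' with
      | zero => rw [pvGreedyGo, pvGreedyGo, if_neg (by push Not; intro; omega)]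
      | succ m =>
          rw [pvGreedyGo, pvGreedyGo]
          split_ifs with h
          · exact ih m v sym (dec - v) (rome ++ sym) hv (by omega) (by omega)
          · rfl

theorem pvGreedyGo_fuel (f : Nat) (v : Int) (sym : String) (dec : Int) (rome : String)
    (hv : 0 < v) (hf : dec.toNat ≤ f) :
    pvGreedyGo f v sym dec rome = pvGreedy v sym dec rome := by
  unfold pvGreedy
  exact pvGreedyGo_fuel2 f dec.toNat v sym dec rome hv hf (le_refl _)

theorem pvGreedy_M (k : Nat) : ∀ (d : Int), d.toNat = k → 0 ≤ d →
    pvGreedy 1000 "M" d "" = (PySem.Int.mod d 1000, pvMRep (PySem.Int.floordiv d 1000).toNat) := by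
  induction k using Nat.strong_induction_on with
  | _ k ih =>
    intro d hk hd
    rw [PySem.Int.mod_eq_emod_of_pos (by norm_num), PySem.Int.floordiv_eq_ediv_of_pos (by norm_num)]
    by_cases hbig : 1000 ≤ d
    · have h1 : d.toNat = (d.toNat - 1) + 1 := by omega
      unfold pvGreedy
      rw [h1, pvGreedyGo, if_pos ⟨by norm_num, hbig⟩]
      rw [pvGreedyGo_fuel _ _ _ _ _ (by norm_num) (by omega)]
      have hM : ("" ++ "M" : String) = "M" ++ "" := by simp
      rw [hM, pvGreedy_append]
      rw [ih (d - 1000).toNat (by omega) (d - 1000) rfl (by omega)]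
      rw [PySem.Int.mod_eq_emod_of_pos (by norm_num), PySem.Int.floordiv_eq_ediv_of_pos (by norm_num)]
      have e1 : (d - 1000) % 1000 = d % 1000 := by omega
      have e2 : (d / 1000).toNat = ((d - 1000) / 1000).toNat + 1 := by omega
      rw [e1, e2, pvMRep]
    · unfold pvGreedy
      have e1 : d % 1000 = d := by omega
      have e2 : (d / 1000).toNat = 0 := by omega
      rw [e1, e2, pvMRep]
      rcases Nat.eq_zero_or_eq_succ_pred d.toNat with h0 | h0
      · rw [h0]; rfl
      · rw [h0, pvGreedyGo, if_neg (by push Not; intro; omega)]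

theorem pvFoldA_append (l : List (Int × Int)) (h : ∀ p ∈ l, p.2 ≠ 1000) :
    ∀ (pfx t : String) (dec : Int),
      l.foldl pvStepA (pfx ++ t, dec)
        = (pfx ++ (l.foldl pvStepA (t, dec)).1, (l.foldl pvStepA (t, dec)).2) := by
  induction l with
  | nil => intro pfx t dec; rfl
  | cons a l ih =>
      intro pfx t dec
      have ha : a.2 ≠ 1000 := h a (List.mem_cons_self ..)
      have hstep : pvStepA (pfx ++ t, dec) a
          = (pfx ++ (pvStepA (t, dec) a).1, (pvStepA (t, dec) a).2) := by
        unfold pvStepA pvLoopDigit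
        simp only [if_neg ha]
        rw [pvLoopDigitGo_append]
      rw [List.foldl_cons, List.foldl_cons, hstep,
          ih (fun p hp => h p (List.mem_cons_of_mem _ hp))]

theorem pvFoldB_append (l : List (Int × String)) :
    ∀ (dec : Int) (pfx t : String),
      l.foldl (fun st p => pvGreedy p.1 p.2 st.1 st.2) (dec, pfx ++ t)
        = ((l.foldl (fun st p => pvGreedy p.1 p.2 st.1 st.2) (dec, t)).1,
           pfx ++ (l.foldl (fun st p => pvGreedy p.1 p.2 st.1 st.2) (dec, t)).2) := by
  induction l with
  | nil => intro dec pfx t; rfl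
  | cons a l ih =>
      intro dec pfx t
      rw [List.foldl_cons, List.foldl_cons]
      show l.foldl _ (pvGreedy a.1 a.2 dec (pfx ++ t)) = _
      rw [pvGreedy_append]
      exact ih _ _ _

set_option maxRecDepth 40000 in
theorem pvSmallAgree : ∀ n : Nat, n < 1000 → decimal_to_rome (n : Int) = decimal_to_rome_alt (n : Int) := by
  decide

theorem pvModDivFacts (d : Int) (hd : 0 ≤ d) :
    PySem.Int.floordiv (PySem.Int.mod d 1000) 1000 = 0 ∧
    PySem.Int.mod (PySem.Int.mod d 1000) 1000 = PySem.Int.mod d 1000 := by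
  rw [PySem.Int.mod_eq_emod_of_pos (by norm_num), PySem.Int.mod_eq_emod_of_pos (by norm_num),
      PySem.Int.floordiv_eq_ediv_of_pos (by norm_num)]
  constructor <;> omega

theorem pvA_split (d : Int) (hd : 0 ≤ d) :
    decimal_to_rome d
      = pvMRep (PySem.Int.floordiv d 1000).toNat ++ decimal_to_rome (PySem.Int.mod d 1000) := by
  obtain ⟨hf, hm⟩ := pvModDivFacts d hd
  unfold decimal_to_rome pvBaseA
  simp only [PySem.List.enumerate_cons, PySem.List.enumerate_nil]
  conv_lhs => rw [List.foldl_cons]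
  conv_rhs => rw [List.foldl_cons]
  have e1 : pvStepA ("", d) (0, 1000)
      = (pvMRep (PySem.Int.floordiv d 1000).toNat ++ "", PySem.Int.mod d 1000) := by
    unfold pvStepA pvLoopM
    simp [pvLoopMGo_spec]
  have e2 : pvStepA ("", PySem.Int.mod d 1000) (0, 1000) = ("", PySem.Int.mod d 1000) := by
    unfold pvStepA pvLoopM
    rw [if_pos rfl, hf, hm]
    rfl
  rw [e1, e2]
  rw [pvFoldA_append _ (by decide)]

theorem pvB_split (d : Int) (hd : 0 ≤ d) :
    decimal_to_rome_alt d
      = pvMRep (PySem.Int.floordiv d 1000).toNat ++ decimal_to_rome_alt (PySem.Int.mod d 1000) := by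
  obtain ⟨hf, hm⟩ := pvModDivFacts d hd
  unfold decimal_to_rome_alt pvTableB
  conv_lhs => rw [List.foldl_cons]
  conv_rhs => rw [List.foldl_cons]
  have e1 : pvGreedy 1000 "M" d ""
      = (PySem.Int.mod d 1000, pvMRep (PySem.Int.floordiv d 1000).toNat ++ "") := by
    rw [pvGreedy_M d.toNat d rfl hd, String.append_empty]
  have e2 : pvGreedy 1000 "M" (PySem.Int.mod d 1000) "" = (PySem.Int.mod d 1000, "") := by
    rw [pvGreedy_M (PySem.Int.mod d 1000).toNat _ rfl (PySem.Int.mod_nonneg _ (by norm_num)),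
        hf, hm]
    rfl
  rw [e1, e2, pvFoldB_append]

-- ===== VERDICT (by name: the statement is the Claim_ definition above) =====
theorem decimal_to_rome_spec : Claim_equal_decimal_to_rome := by
  intro d _ hpre
  unfold Spec_decimal_to_rome
  rw [pvA_split d hpre, pvB_split d hpre]
  have h0 : 0 ≤ PySem.Int.mod d 1000 := PySem.Int.mod_nonneg _ (by norm_num)
  have h1 : PySem.Int.mod d 1000 < 1000 := PySem.Int.mod_lt _ (by norm_num)
  have := pvSmallAgree (PySem.Int.mod d 1000).toNat (by omega)
  rw [Int.toNat_of_nonneg h0] at this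
  rw [this]
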